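-- pv_equiv track=rewrite | github.com/ricardoserradas/1stStepsInPython | 032-DArrays.py | rooks_are_safe
-- ===== SOURCE A (Python) =====
-- def rooks_are_safe(chessboard):
--     lines = []
--     columns = []
--     for line in range(len(chessboard)):
--         for column in range(len(chessboard[line])):
--             if(chessboard[line][column] == 1):
--                 if(line not in lines):
--                     lines.append(line)
--                 else:
--                     return False
--                 if(column not in columns):
--                     columns.append(column)
--                 else:
--                     return False
--     return True
-- ===== SOURCE B (Python) =====
-- def rooks_are_safe(chessboard):
--     rooks = [(i, j)
--              for i, row in enumerate(chessboard)
--              for j, v in enumerate(row) if v == 1]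
--     return all(p[0] != q[0] and p[1] != q[1]
--                for k, p in enumerate(rooks)
--                for q in rooks[k + 1:])
-- ===== Notes on version B (the rewrite author's own statement) =====
-- stated objective: alternative
-- what changed: Replaces A's scan-with-dedup (accumulator lists with in-loop membership tests and early returns) by a pairwise algorithm: collect all rook coordinates once, then check that no pair of rooks shares a row or a column.
import Mathlib
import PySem

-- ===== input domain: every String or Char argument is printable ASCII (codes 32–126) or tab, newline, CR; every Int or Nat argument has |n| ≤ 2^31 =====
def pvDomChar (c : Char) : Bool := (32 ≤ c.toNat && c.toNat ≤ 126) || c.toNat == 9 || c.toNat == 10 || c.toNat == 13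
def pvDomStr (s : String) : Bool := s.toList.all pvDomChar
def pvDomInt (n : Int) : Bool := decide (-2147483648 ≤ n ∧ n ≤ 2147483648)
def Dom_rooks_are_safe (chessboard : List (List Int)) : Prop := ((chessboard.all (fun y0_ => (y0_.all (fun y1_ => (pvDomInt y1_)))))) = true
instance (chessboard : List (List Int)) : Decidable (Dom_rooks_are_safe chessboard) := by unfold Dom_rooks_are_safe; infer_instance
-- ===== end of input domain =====

-- B replaces A's scan-with-dedup (membership tests against accumulator lists, early
-- returns) by a different algorithm: collect all rook coordinates once, then compare
-- every pair of rooks — safe iff no pair shares a row or a column (objective: alternative).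

-- ===== PORT A =====
-- inner loop: 'for column in range(len(row))', with the two membership tests and early returns
def pvAInner (line : Int) (row : List Int) (col : Int) (lines cols : List Int) :
    Option (List Int × List Int) :=
  match row with
  | [] => some (lines, cols)
  | v :: rest =>
    if v = 1 then
      if line ∈ lines then none
      else if col ∈ cols then none
      else pvAInner line rest (col + 1) (lines ++ [line]) (cols ++ [col])
    else pvAInner line rest (col + 1) lines cols

-- outer loop: 'for line in range(len(chessboard))'; none = an early 'return False'
def pvAOuter (rows : List (List Int)) (line : Int) (lines cols : List Int) : Bool :=
  match rows with
  | [] => true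
  | row :: rest =>
    match pvAInner line row 0 lines cols with
    | none => false
    | some (l, c) => pvAOuter rest (line + 1) l c

def rooks_are_safe (chessboard : List (List Int)) : Bool :=
  pvAOuter chessboard 0 [] []

-- ===== PORT B =====
-- the rook-coordinate comprehension: outer loop over rows with index i, inner over the row
def pvRooks (cb : List (List Int)) (i : Int) : List (Int × Int) :=
  match cb with
  | [] => []
  | row :: rest =>
    (PySem.List.enumerate row 0).flatMap (fun q => if q.2 = 1 then [(i, q.1)] else [])
      ++ pvRooks rest (i + 1)

-- 'all(p[0] != q[0] and p[1] != q[1] for k, p in enumerate(rooks) for q in rooks[k+1:])'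
def pvAllPairs (rooks : List (Int × Int)) : Bool :=
  match rooks with
  | [] => true
  | p :: rest => rest.all (fun q => p.1 != q.1 && p.2 != q.2) && pvAllPairs rest

def rooks_are_safe_alt (chessboard : List (List Int)) : Bool :=
  pvAllPairs (pvRooks chessboard 0)

-- ===== PRECONDITION & SPEC =====
def Spec_rooks_are_safe (chessboard : List (List Int)) (out : Bool) : Prop := out = rooks_are_safe_alt chessboard
instance (chessboard : List (List Int)) (out : Bool) : Decidable (Spec_rooks_are_safe chessboard out) := by unfold Spec_rooks_are_safe; infer_instance

-- ===== CLAIM (what is proved, stated in full; the proofs are below) =====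
def Claim_equal_rooks_are_safe : Prop := ∀ (chessboard : List (List Int)), Dom_rooks_are_safe chessboard → Spec_rooks_are_safe chessboard (rooks_are_safe chessboard)

-- ===== LEMMAS AND PROOFS =====

-- column indices (from offset c) of the rooks in one row
def pvRookCols (c : Int) (row : List Int) : List Int :=
  match row with
  | [] => []
  | v :: rest => if v = 1 then c :: pvRookCols (c + 1) rest else pvRookCols (c + 1) rest

-- number of rooks in a row
def pvRookCount (row : List Int) : Nat := (row.filter (fun v => v == 1)).length

-- all rook column indices of the board
def pvColsOf (cb : List (List Int)) : List Int := cb.flatMap (pvRookCols 0)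

lemma length_pvRookCols (row : List Int) : ∀ c, (pvRookCols c row).length = pvRookCount row := by
  induction row with
  | nil => intro c; rfl
  | cons v rest ih =>
    intro c
    by_cases h : v = 1 <;>
      simp [pvRookCols, pvRookCount, h, ih (c + 1)]

-- the inner loop once this row's line index is already recorded
lemma inner_mem (line : Int) (row : List Int) :
    ∀ c (lines cols : List Int), line ∈ lines →
    pvAInner line row c lines cols =
      if pvRookCols c row = [] then some (lines, cols) else none := by
  induction row with
  | nil => intro c lines cols _; rfl
  | cons v rest ih =>
    intro c lines cols hmem
    by_cases h : v = 1
    · simp [pvAInner, pvRookCols, h, hmem]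
    · simp only [pvAInner, pvRookCols, if_neg h]
      exact ih (c + 1) lines cols hmem

-- the inner loop on a fresh line index
lemma inner_notmem (line : Int) (row : List Int) :
    ∀ c (lines cols : List Int), line ∉ lines →
    pvAInner line row c lines cols =
      match pvRookCols c row with
      | [] => some (lines, cols)
      | j :: rest =>
        if j ∈ cols then none
        else if rest = [] then some (lines ++ [line], cols ++ [j]) else none := by
  induction row with
  | nil => intro c lines cols _; rfl
  | cons v tail ih =>
    intro c lines cols hmem
    by_cases h : v = 1
    · simp only [pvAInner, pvRookCols, if_pos h, if_neg hmem]
      by_cases hc : c ∈ cols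
      · simp [hc]
      · simp only [if_neg hc]
        rw [inner_mem line tail (c + 1) (lines ++ [line]) (cols ++ [c]) (by simp)]
    · simp only [pvAInner, pvRookCols, if_neg h]
      exact ih (c + 1) lines cols hmem

-- characterisation of A's outer loop
lemma outer_char (cb : List (List Int)) :
    ∀ (i : Int) (lines cols : List Int), (∀ x ∈ lines, x < i) → cols.Nodup →
    pvAOuter cb i lines cols =
      (decide (∀ row ∈ cb, pvRookCount row ≤ 1) && decide ((cols ++ pvColsOf cb).Nodup)) := by
  induction cb with
  | nil =>
    intro i lines cols _ hcols
    simp [pvAOuter, pvColsOf, hcols]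
  | cons row rest ih =>
    intro i lines cols hlt hcols
    have hni : i ∉ lines := fun h => absurd (hlt i h) (lt_irrefl i)
    simp only [pvAOuter]
    rw [inner_notmem i row 0 lines cols hni]
    have hcolsof : pvColsOf (row :: rest) = pvRookCols 0 row ++ pvColsOf rest := by
      simp [pvColsOf]
    rcases hrc : pvRookCols 0 row with _ | ⟨j, js⟩
    · have hcnt : pvRookCount row = 0 := by
        have := length_pvRookCols row 0; rw [hrc] at this; simpa using this.symm
      dsimp only
      rw [ih (i + 1) lines cols (fun x hx => lt_trans (hlt x hx) (by omega)) hcols]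
      simp [hcolsof, hrc, hcnt]
    · rcases js with _ | ⟨k, ks⟩
      · have hcnt : pvRookCount row = 1 := by
          have := length_pvRookCols row 0; rw [hrc] at this; simpa using this.symm
        by_cases hj : j ∈ cols
        · have hnn : ¬ (cols ++ pvColsOf (row :: rest)).Nodup := by
            rw [hcolsof, hrc]
            intro hnd
            rcases List.nodup_append.1 hnd with ⟨_, _, hdisj⟩
            exact hdisj j hj j (by simp) rfl
          simp [hj, hnn]
        · simp only [if_neg hj, if_true]
          have hnd' : (cols ++ [j]).Nodup := by
            rw [List.nodup_append]
            refine ⟨hcols, List.nodup_singleton j, ?_⟩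
            intro a ha b hb
            simp only [List.mem_singleton] at hb
            subst hb
            exact fun h => hj (h ▸ ha)
          rw [ih (i + 1) (lines ++ [i]) (cols ++ [j])
            (by intro x hx
                rcases List.mem_append.1 hx with h | h
                · exact lt_trans (hlt x h) (by omega)
                · simp at h; omega) hnd']
          simp [hcolsof, hrc, hcnt, List.append_assoc]
      · have hcnt : 2 ≤ pvRookCount row := by
          have := length_pvRookCols row 0; rw [hrc] at this; simp at this; omega
        have hnall : ¬ (∀ r ∈ row :: rest, pvRookCount r ≤ 1) := by
          intro h; have := h row (by simp); omega
        by_cases hj : j ∈ cols <;> simp [hj] <;>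
          · intro h
            exact absurd h (by omega)

-- B's inner comprehension: column projections are pvRookCols
lemma inner_map_snd (i : Int) (row : List Int) :
    ∀ c : Int, (((PySem.List.enumerate row c).flatMap
      (fun q => if q.2 = 1 then [(i, q.1)] else [])).map Prod.snd) = pvRookCols c row := by
  induction row with
  | nil => intro c; simp [PySem.List.enumerate_nil, pvRookCols]
  | cons v rest ih =>
    intro c
    rw [PySem.List.enumerate_cons]
    by_cases h : v = 1 <;> simp [pvRookCols, h, ih (c + 1)]

-- B's inner comprehension: row projections are a replicate
lemma inner_map_fst (i : Int) (row : List Int) :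
    ∀ c : Int, (((PySem.List.enumerate row c).flatMap
      (fun q => if q.2 = 1 then [(i, q.1)] else [])).map Prod.fst)
      = List.replicate (pvRookCount row) i := by
  induction row with
  | nil => intro c; simp [PySem.List.enumerate_nil, pvRookCount]
  | cons v rest ih =>
    intro c
    rw [PySem.List.enumerate_cons]
    by_cases h : v = 1 <;>
      simp [pvRookCount, h, List.replicate_succ, ih (c + 1)]

lemma rooks_map_snd (cb : List (List Int)) :
    ∀ i : Int, (pvRooks cb i).map Prod.snd = pvColsOf cb := by
  induction cb with
  | nil => intro i; simp [pvRooks, pvColsOf]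
  | cons row rest ih =>
    intro i
    simp only [pvRooks, List.map_append, ih (i + 1), inner_map_snd i row 0]
    simp [pvColsOf]

-- every rook row index built from offset i is ≥ i
lemma rooks_fst_ge (cb : List (List Int)) :
    ∀ (i x : Int), x ∈ (pvRooks cb i).map Prod.fst → i ≤ x := by
  induction cb with
  | nil => intro i x h; simp [pvRooks] at h
  | cons row rest ih =>
    intro i x h
    simp only [pvRooks, List.map_append, List.mem_append, inner_map_fst i row 0] at h
    rcases h with h | h
    · rw [List.eq_of_mem_replicate h]
    · have := ih (i + 1) x h; omega

-- the rook row indices are duplicate-free iff every row holds at most one rook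
lemma rooks_fst_nodup (cb : List (List Int)) :
    ∀ i : Int, ((pvRooks cb i).map Prod.fst).Nodup ↔ ∀ row ∈ cb, pvRookCount row ≤ 1 := by
  induction cb with
  | nil => intro i; simp [pvRooks]
  | cons row rest ih =>
    intro i
    simp only [pvRooks, List.map_append, List.nodup_append, inner_map_fst i row 0,
      List.forall_mem_cons, ih (i + 1), List.nodup_replicate]
    constructor
    · rintro ⟨h1, h2, _⟩; exact ⟨h1, h2⟩
    · rintro ⟨h1, h2⟩
      refine ⟨h1, h2, ?_⟩
      intro x hx y hy
      have hxi : x = i := List.eq_of_mem_replicate hx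
      have := rooks_fst_ge rest (i + 1) y hy
      omega

-- the pairwise check says exactly 'pairwise distinct rows and pairwise distinct columns'
lemma allPairs_iff (xs : List (Int × Int)) :
    pvAllPairs xs = true ↔ xs.Pairwise (fun p q => p.1 ≠ q.1 ∧ p.2 ≠ q.2) := by
  induction xs with
  | nil => simp [pvAllPairs]
  | cons p rest ih =>
    simp [pvAllPairs, List.pairwise_cons, ih, List.all_eq_true, and_comm]

-- ===== VERDICT (by name: the statement is the Claim_ definition above) =====
theorem rooks_are_safe_spec : Claim_equal_rooks_are_safe := by
  intro cb _
  unfold Spec_rooks_are_safe rooks_are_safe rooks_are_safe_alt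
  rw [outer_char cb 0 [] [] (by simp) List.nodup_nil]
  have hB : pvAllPairs (pvRooks cb 0)
      = decide ((pvRooks cb 0).Pairwise (fun p q => p.1 ≠ q.1 ∧ p.2 ≠ q.2)) := by
    by_cases h : pvAllPairs (pvRooks cb 0) = true
    · rw [h, eq_comm, decide_eq_true_eq]; exact (allPairs_iff _).1 h
    · rw [Bool.not_eq_true] at h
      rw [h, eq_comm, decide_eq_false_iff_not]
      intro hp
      rw [(allPairs_iff _).2 hp] at h
      exact Bool.true_eq_false.mp h
  rw [hB]
  have hsplit : (pvRooks cb 0).Pairwise (fun p q => p.1 ≠ q.1 ∧ p.2 ≠ q.2)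
      ↔ ((pvRooks cb 0).map Prod.fst).Nodup ∧ ((pvRooks cb 0).map Prod.snd).Nodup := by
    simp only [List.Nodup, List.pairwise_map, ← List.pairwise_and_iff]
  rw [Bool.and_comm, ← Bool.decide_and]
  apply decide_eq_decide.2
  rw [hsplit, rooks_map_snd cb 0, rooks_fst_nodup cb 0]
  simp [and_comm]
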